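-- pv_equiv track=rewrite | github.com/University-of-Austin/se-spring-2026 | assignments/bbs/ThomasOlson1/bbs_db.py | build_thread_map
-- ===== SOURCE A (Python) =====
-- def build_thread_map(posts):
--     posts_by_id = {post["id"]: post for post in posts}
--     children = {post["id"]: [] for post in posts}
--     roots = []
--     for post in posts:
--         parent_id = post.get("parent_id")
--         if parent_id and parent_id in posts_by_id:
--             children[parent_id].append(post)
--         else:
--             roots.append(post)
--     for child_list in children.values():
--         child_list.sort(key=lambda p: p["timestamp"])
--     roots.sort(key=lambda p: p["timestamp"])
--     return roots, children
-- ===== SOURCE B (Python) =====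
-- def build_thread_map(posts):
--     ids = {post["id"] for post in posts}
--     children = {post["id"]: [] for post in posts}
--     order = sorted(posts, key=lambda p: p["timestamp"])
--     roots = [p for p in order
--              if not (p.get("parent_id") and p.get("parent_id") in ids)]
--     for p in order:
--         pid = p.get("parent_id")
--         if pid and pid in ids:
--             children[pid].append(p)
--     return roots, children
-- ===== Notes on version B (the rewrite author's own statement) =====
-- stated objective: alternative
-- what changed: Instead of partitioning posts in original order and then sorting roots and every child list separately, B sorts all posts by timestamp once and partitions the already-sorted stream (roots by a comprehension, children by appends), relying on sort stability for identical order, with a plain id set replacing the posts_by_id dict for the membership test.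
import Mathlib
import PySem

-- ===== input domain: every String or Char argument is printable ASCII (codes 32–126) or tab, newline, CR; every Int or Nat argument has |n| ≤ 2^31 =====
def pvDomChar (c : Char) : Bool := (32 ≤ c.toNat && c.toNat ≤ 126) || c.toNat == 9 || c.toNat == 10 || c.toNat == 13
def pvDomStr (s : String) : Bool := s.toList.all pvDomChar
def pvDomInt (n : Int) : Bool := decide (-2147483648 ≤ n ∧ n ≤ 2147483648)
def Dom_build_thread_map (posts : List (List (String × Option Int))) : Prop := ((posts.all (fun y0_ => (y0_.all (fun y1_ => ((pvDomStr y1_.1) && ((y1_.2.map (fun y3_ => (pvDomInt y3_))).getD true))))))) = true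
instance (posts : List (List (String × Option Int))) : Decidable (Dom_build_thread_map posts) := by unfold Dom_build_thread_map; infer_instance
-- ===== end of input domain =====

-- B changes the decomposition: one global stable sort by timestamp, then partition the sorted
-- stream into roots and child lists (no per-group sorts); membership test via an id set.

-- ===== PORT A =====
-- post["k"] / post.get("k"): a post dict is an association list; lookup is first match.
def pvGetKey (post : List (String × Option Int)) (k : String) : Option (Option Int) :=
  (PySem.Dict.mk post).get? k

-- post["id"] / post["timestamp"]: Pre_ guarantees the key is present with a non-None value,
-- so the defaults are never reached on admitted inputs.
def pvId (post : List (String × Option Int)) : Int := ((pvGetKey post "id").getD none).getD 0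
def pvTs (post : List (String × Option Int)) : Int := ((pvGetKey post "timestamp").getD none).getD 0
-- post.get("parent_id")
def pvParent (post : List (String × Option Int)) : Option Int := (pvGetKey post "parent_id").getD none

-- posts_by_id = {post["id"]: post for post in posts}
def pvByIdA (posts : List (List (String × Option Int))) : PySem.Dict Int (List (String × Option Int)) :=
  posts.foldl (fun d post => d.insert (pvId post) post) PySem.Dict.empty

-- children = {post["id"]: [] for post in posts}  (built identically by A and B)
def pvChildren0 (posts : List (List (String × Option Int))) : PySem.Dict Int (List (List (String × Option Int))) :=
  posts.foldl (fun d post => d.insert (pvId post) []) PySem.Dict.empty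

-- body of A's partition loop (state = (roots, children)); 'parent_id and parent_id in posts_by_id'
def pvStepA (byid : PySem.Dict Int (List (String × Option Int)))
    (st : List (List (String × Option Int)) × PySem.Dict Int (List (List (String × Option Int))))
    (post : List (String × Option Int)) :
    List (List (String × Option Int)) × PySem.Dict Int (List (List (String × Option Int))) :=
  match pvParent post with
  | some q => if q != 0 && byid.contains q
              then (st.1, st.2.modify q [] (· ++ [post]))
              else (st.1 ++ [post], st.2)
  | none => (st.1 ++ [post], st.2)

def build_thread_map (posts : List (List (String × Option Int))) : (List (List (String × Option Int))) × (List (Int × List (List (String × Option Int)))) :=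
  let posts_by_id := pvByIdA posts
  let st := posts.foldl (pvStepA posts_by_id) ([], pvChildren0 posts)
  -- every child list and roots sorted by timestamp; the children dict is returned as its items
  (PySem.List.sorted st.1 pvTs,
   st.2.items.map (fun kv => (kv.1, PySem.List.sorted kv.2 pvTs)))

-- ===== PORT B =====
-- ids = {post["id"] for post in posts}
def pvIds (posts : List (List (String × Option Int))) : PySem.Set Int :=
  PySem.Set.ofList (posts.map pvId)

-- 'p.get("parent_id") and p.get("parent_id") in ids'
def pvCond (ids : PySem.Set Int) (post : List (String × Option Int)) : Bool :=
  match pvParent post with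
  | some q => q != 0 && PySem.Set.contains ids q
  | none => false

-- body of B's children loop
def pvStepB (ids : PySem.Set Int)
    (d : PySem.Dict Int (List (List (String × Option Int))))
    (post : List (String × Option Int)) : PySem.Dict Int (List (List (String × Option Int))) :=
  match pvParent post with
  | some q => if q != 0 && PySem.Set.contains ids q then d.modify q [] (· ++ [post]) else d
  | none => d

def build_thread_map_alt (posts : List (List (String × Option Int))) : (List (List (String × Option Int))) × (List (Int × List (List (String × Option Int)))) :=
  let ids := pvIds posts
  let order := PySem.List.sorted posts pvTs
  let roots := order.filter (fun p => !(pvCond ids p))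
  let children := order.foldl (pvStepB ids) (pvChildren0 posts)
  (roots, children.items)

-- ===== PRECONDITION & SPEC =====
-- Pre_ excludes posts missing an "id" or "timestamp" key or carrying None for either: A raises
-- KeyError (missing key) or TypeError (comparing None with an int while sorting) on almost all
-- of them, except a degenerate corner where every None timestamp sits in a sort of size ≤ 1, so
-- A returns without comparing; an int key for the children dict is also forced by the return type.
def Pre_build_thread_map (posts : List (List (String × Option Int))) : Prop :=
  ∀ post ∈ posts, (((pvGetKey post "id").getD none).isSome = true)
    ∧ (((pvGetKey post "timestamp").getD none).isSome = true)
instance (posts : List (List (String × Option Int))) : Decidable (Pre_build_thread_map posts) := by unfold Pre_build_thread_map; infer_instance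

def pvWitness_build_thread_map : (List (List (String × Option Int))) :=
  [[("id", some 1), ("timestamp", some 5)], [("id", some 2), ("parent_id", some 1), ("timestamp", some 3)]]

def Spec_build_thread_map (posts : List (List (String × Option Int))) (out : (List (List (String × Option Int))) × (List (Int × List (List (String × Option Int))))) : Prop := out = build_thread_map_alt posts
instance (posts : List (List (String × Option Int))) (out : (List (List (String × Option Int))) × (List (Int × List (List (String × Option Int))))) : Decidable (Spec_build_thread_map posts out) := by unfold Spec_build_thread_map; infer_instance

-- ===== CLAIM (what is proved, stated in full; the proofs are below) =====
def Claim_equal_build_thread_map : Prop := ∀ (posts : List (List (String × Option Int))), Dom_build_thread_map posts → Pre_build_thread_map posts → Spec_build_thread_map posts (build_thread_map posts)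

-- ===== LEMMAS AND PROOFS =====

lemma insertBy_nil {α : Type} (before : α → α → Bool) (x : α) :
    PySem.List.insertBy before x [] = [x] := rfl
lemma insertBy_cons {α : Type} (before : α → α → Bool) (x y : α) (t : List α) :
    PySem.List.insertBy before x (y :: t)
      = if before x y then x :: y :: t else y :: PySem.List.insertBy before x t := rfl
lemma insertBy_all_before {α : Type} (before : α → α → Bool) (x : α) (w : List α)
    (h : ∀ z ∈ w, before x z = true) : PySem.List.insertBy before x w = x :: w := by
  cases w with
  | nil => rfl
  | cons y t => rw [insertBy_cons, if_pos (h y (by simp))]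

lemma filter_insertBy {α : Type} (key : α → Int) (p : α → Bool) (x : α) (ys : List α)
    (hys : ys.Pairwise (fun a b => key a ≤ key b)) :
    (PySem.List.insertBy (fun a b => decide (key a < key b)) x ys).filter p
      = if p x then PySem.List.insertBy (fun a b => decide (key a < key b)) x (ys.filter p)
        else ys.filter p := by
  induction ys with
  | nil => cases hpx : p x <;> simp [insertBy_nil, hpx]
  | cons y t ih =>
    rcases List.pairwise_cons.mp hys with ⟨hy, ht⟩
    rw [insertBy_cons]
    by_cases hlt : key x < key y
    · rw [if_pos (by simpa using hlt)]
      cases hpx : p x <;> cases hpy : p y <;>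
        simp only [List.filter_cons, hpx, hpy, if_true, if_false, Bool.false_eq_true,
          ite_true, ite_false]
      · rw [insertBy_all_before]
        intro z hz
        have hzt := List.mem_of_mem_filter hz
        have := hy z hzt
        simp; omega
      · rw [insertBy_cons, if_pos (by simpa using hlt)]
    · rw [if_neg (by simpa using hlt)]
      cases hpx : p x <;> cases hpy : p y <;>
        simp only [List.filter_cons, hpx, hpy, Bool.false_eq_true, ite_true, ite_false,
          if_true, if_false] <;>
        rw [ih ht] <;>
        simp only [hpx, Bool.false_eq_true, ite_true, ite_false, if_true, if_false]
      rw [insertBy_cons, if_neg (by simpa using hlt)]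

lemma filter_sorted {α : Type} (key : α → Int) (p : α → Bool) (l : List α) :
    (PySem.List.sorted l key).filter p = PySem.List.sorted (l.filter p) key := by
  induction l using List.reverseRecOn with
  | nil => rfl
  | append_singleton l x ih =>
    rw [PySem.List.sorted_eq_foldl_insertBy (l ++ [x]), List.foldl_append]
    simp only [List.foldl_cons, List.foldl_nil]
    rw [← PySem.List.sorted_eq_foldl_insertBy l key]
    rw [filter_insertBy key p x _ (PySem.List.sorted_pairwise l key)]
    rw [List.filter_append]
    cases hpx : p x
    · simp only [List.filter_cons, hpx, Bool.false_eq_true, ite_false, List.filter_nil,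
        List.append_nil, ih, if_false]
    · simp only [List.filter_cons, hpx, ite_true, List.filter_nil, if_true]
      rw [PySem.List.sorted_eq_foldl_insertBy (l.filter p ++ [x]), List.foldl_append]
      simp only [List.foldl_cons, List.foldl_nil]
      rw [← PySem.List.sorted_eq_foldl_insertBy (l.filter p) key, ih]

lemma keys_pvByIdA (posts : List (List (String × Option Int))) :
    (pvByIdA posts).keys = pvIds posts := by
  unfold pvByIdA pvIds
  simpa [PySem.Set.update, PySem.Set.ofList_eq_foldl, PySem.Dict.keys_empty] using
    PySem.Dict.keys_foldl_insert_key posts pvId (fun _ p => p) PySem.Dict.empty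
lemma keys_pvChildren0 (posts : List (List (String × Option Int))) :
    (pvChildren0 posts).keys = pvIds posts := by
  unfold pvChildren0 pvIds
  simpa [PySem.Set.update, PySem.Set.ofList_eq_foldl, PySem.Dict.keys_empty] using
    PySem.Dict.keys_foldl_insert_key posts pvId (fun _ _ => ([] : List (List (String × Option Int)))) PySem.Dict.empty
lemma nodup_pvIds (posts : List (List (String × Option Int))) : (pvIds posts).Nodup :=
  PySem.Set.nodup_ofList _
lemma contains_pvByIdA (posts : List (List (String × Option Int))) (q : Int) :
    (pvByIdA posts).contains q = PySem.Set.contains (pvIds posts) q := by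
  rw [PySem.Dict.contains_eq_decide_mem_keys, keys_pvByIdA]
  simp [PySem.Set.contains]

lemma stepA_eq (posts : List (List (String × Option Int)))
    (st : List (List (String × Option Int)) × PySem.Dict Int (List (List (String × Option Int))))
    (p : List (String × Option Int)) :
    pvStepA (pvByIdA posts) st p
      = (if pvCond (pvIds posts) p then st.1 else st.1 ++ [p], pvStepB (pvIds posts) st.2 p) := by
  cases hp : pvParent p with
  | none => simp [pvStepA, pvStepB, pvCond, hp]
  | some q =>
    by_cases hq : (q != 0 && PySem.Set.contains (pvIds posts) q) = true
    · simp only [pvStepA, pvStepB, pvCond, hp, contains_pvByIdA]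
      split <;> rfl
    · simp only [pvStepA, pvStepB, pvCond, hp, contains_pvByIdA]
      split <;> rfl

lemma foldA_split (posts : List (List (String × Option Int)))
    (l : List (List (String × Option Int)))
    (rs : List (List (String × Option Int)))
    (ch : PySem.Dict Int (List (List (String × Option Int)))) :
    List.foldl (pvStepA (pvByIdA posts)) (rs, ch) l
      = (List.foldl (fun a p => if pvCond (pvIds posts) p then a else a ++ [p]) rs l,
         List.foldl (pvStepB (pvIds posts)) ch l) := by
  induction l generalizing rs ch with
  | nil => rfl
  | cons p t ih =>
    simp only [List.foldl_cons]
    rw [stepA_eq]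
    exact ih _ _


lemma stepB_none (ids : PySem.Set Int) (d : PySem.Dict Int (List (List (String × Option Int))))
    (p : List (String × Option Int)) (hp : pvParent p = none) : pvStepB ids d p = d := by
  simp only [pvStepB, hp]
lemma stepB_some_true (ids : PySem.Set Int) (d : PySem.Dict Int (List (List (String × Option Int))))
    (p : List (String × Option Int)) (q : Int) (hp : pvParent p = some q)
    (hq : (q != 0 && PySem.Set.contains ids q) = true) :
    pvStepB ids d p = d.modify q [] (· ++ [p]) := by
  simp only [pvStepB, hp]
  rw [if_pos hq]
lemma stepB_some_false (ids : PySem.Set Int) (d : PySem.Dict Int (List (List (String × Option Int))))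
    (p : List (String × Option Int)) (q : Int) (hp : pvParent p = some q)
    (hq : ¬((q != 0 && PySem.Set.contains ids q) = true)) : pvStepB ids d p = d := by
  simp only [pvStepB, hp]
  rw [if_neg hq]

lemma keys_foldB (ids : PySem.Set Int) (l : List (List (String × Option Int)))
    (d : PySem.Dict Int (List (List (String × Option Int))))
    (h : ∀ q, PySem.Set.contains ids q = true → q ∈ d.keys) :
    (List.foldl (pvStepB ids) d l).keys = d.keys := by
  induction l generalizing d with
  | nil => rfl
  | cons p t ih =>
    rw [List.foldl_cons]
    cases hp : pvParent p with
    | none => rw [stepB_none ids d p hp]; exact ih d h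
    | some q =>
      by_cases hq : (q != 0 && PySem.Set.contains ids q) = true
      · have hmem : q ∈ d.keys := h q (by have := hq; simp only [Bool.and_eq_true] at this; exact this.2)
        have hkeys : (d.modify q [] (· ++ [p])).keys = d.keys := by
          rw [PySem.Dict.keys_modify, PySem.Dict.keys_insert_of_contains]
          exact (PySem.Dict.contains_iff_mem_keys d q).mpr hmem
        rw [stepB_some_true ids d p q hp hq]
        rw [ih _ (fun r hr => hkeys ▸ h r hr)]
        exact hkeys
      · rw [stepB_some_false ids d p q hp hq]; exact ih d h

lemma getD_foldB (ids : PySem.Set Int) (l : List (List (String × Option Int)))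
    (d : PySem.Dict Int (List (List (String × Option Int)))) (k : Int) :
    (List.foldl (pvStepB ids) d l).getD k []
      = d.getD k [] ++ l.filter (fun p => pvCond ids p && ((pvParent p).getD 0 == k)) := by
  induction l generalizing d with
  | nil => simp
  | cons p t ih =>
    rw [List.foldl_cons, List.filter_cons]
    cases hp : pvParent p with
    | none =>
      rw [stepB_none ids d p hp]
      simp only [pvCond, hp, Bool.false_and, Bool.false_eq_true, ite_false, if_false]
      exact ih d
    | some q =>
      by_cases hq : (q != 0 && PySem.Set.contains ids q) = true
      · rw [stepB_some_true ids d p q hp hq]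
        rw [ih]
        have hc : (pvCond ids p && ((some q : Option Int).getD 0 == k)) = (q == k) := by
          simp only [pvCond, hp, Option.getD_some]
          rw [hq, Bool.true_and]
        rw [hc]
        by_cases hqk : q = k
        · rw [PySem.Dict.getD_modify, if_pos hqk.symm]
          have : (q == k) = true := by simp [hqk]
          rw [this, if_pos rfl]
          simp [List.append_assoc, hqk]
        · rw [PySem.Dict.getD_modify, if_neg (fun hh => hqk hh.symm)]
          have : (q == k) = false := by simp [hqk]
          rw [this]
          simp
      · rw [stepB_some_false ids d p q hp hq]
        have hb : (q != 0 && PySem.Set.contains ids q) = false := Bool.eq_false_iff.mpr hq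
        have hc : (pvCond ids p && ((some q : Option Int).getD 0 == k)) = false := by
          simp only [pvCond, hp, hb, Bool.false_and]
        rw [hc]
        simp only [Bool.false_eq_true, ite_false, if_false]
        exact ih d

lemma getD_pvChildren0 (posts : List (List (String × Option Int))) (k : Int) :
    (pvChildren0 posts).getD k [] = [] := by
  unfold pvChildren0
  suffices h : ∀ (l : List (List (String × Option Int)))
      (d : PySem.Dict Int (List (List (String × Option Int)))),
      (∀ j, d.getD j [] = []) → ∀ j, (l.foldl (fun d p => d.insert (pvId p) []) d).getD j [] = [] by
    exact h posts PySem.Dict.empty (fun j => PySem.Dict.getD_empty ..) k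
  intro l
  induction l with
  | nil => intro d hd j; exact hd j
  | cons p t ih =>
    intro d hd j
    rw [List.foldl_cons]
    refine ih _ (fun j' => ?_) j
    rw [PySem.Dict.getD_insert]
    split
    · rfl
    · exact hd j'

lemma roots_fold_filter (ids : PySem.Set Int) (l : List (List (String × Option Int))) :
    List.foldl (fun a p => if pvCond ids p then a else a ++ [p]) [] l
      = l.filter (fun p => !pvCond ids p) := by
  rw [PySem.List.foldl_congr_mem l _ (fun a p => if (!pvCond ids p) then a ++ [p] else a) []
    (by intro acc x _; cases hc : pvCond ids x <;> simp [hc])]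
  simpa using PySem.List.foldl_append_if_eq_filter (fun p => !pvCond ids p) l []

theorem main_eq (posts : List (List (String × Option Int))) :
    build_thread_map posts = build_thread_map_alt posts := by
  simp only [build_thread_map, build_thread_map_alt]
  rw [foldA_split]
  have hsub : ∀ q, PySem.Set.contains (pvIds posts) q = true → q ∈ (pvChildren0 posts).keys := by
    intro q hq
    rw [keys_pvChildren0]
    simpa [PySem.Set.contains] using hq
  have hkA := keys_foldB (pvIds posts) posts _ hsub
  have hkB := keys_foldB (pvIds posts) (PySem.List.sorted posts pvTs) _ hsub
  have hndA : (List.foldl (pvStepB (pvIds posts)) (pvChildren0 posts) posts).keys.Nodup := by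
    rw [hkA, keys_pvChildren0]; exact nodup_pvIds posts
  have hndB : (List.foldl (pvStepB (pvIds posts)) (pvChildren0 posts) (PySem.List.sorted posts pvTs)).keys.Nodup := by
    rw [hkB, keys_pvChildren0]; exact nodup_pvIds posts
  refine Prod.ext ?_ ?_
  · -- roots
    show PySem.List.sorted (List.foldl (fun a p => if pvCond (pvIds posts) p then a else a ++ [p]) [] posts) pvTs
        = (PySem.List.sorted posts pvTs).filter (fun p => !pvCond (pvIds posts) p)
    rw [roots_fold_filter, filter_sorted]
  · -- children
    show (List.foldl (pvStepB (pvIds posts)) (pvChildren0 posts) posts).items.map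
          (fun kv => (kv.1, PySem.List.sorted kv.2 pvTs))
        = (List.foldl (pvStepB (pvIds posts)) (pvChildren0 posts) (PySem.List.sorted posts pvTs)).items
    rw [PySem.Dict.items_eq_map_keys _ hndA ([]), PySem.Dict.items_eq_map_keys _ hndB ([])]
    rw [hkA, hkB, keys_pvChildren0, List.map_map]
    refine List.map_congr_left ?_
    intro k _
    simp only [Function.comp_apply]
    rw [getD_foldB, getD_foldB, getD_pvChildren0]
    simp only [List.nil_append]
    rw [filter_sorted]

-- ===== VERDICT (by name: the statement is the Claim_ definition above) =====
theorem build_thread_map_spec : Claim_equal_build_thread_map := by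
  intro posts _ _
  unfold Spec_build_thread_map
  exact main_eq posts
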